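-- pv_equiv track=rewrite | github.com/haiqalakhir/AI_pre_assesment_ML_Loke | code4.py | count_statuses
-- ===== SOURCE A (Python) =====
-- VALID_STATUSES = ["OK", "FAULTY", "MAINTENANCE", "INACTIVE"]
--
-- def process_line(line):
--     # Split the line by commas
--     raw_statuses = line.split(",")
--     # Clean and normalize each status (strip spaces, make uppercase)
--     cleaned_statuses = [status.strip().upper() for status in raw_statuses]
--     return cleaned_statuses
--
-- def count_statuses(lines):
--     valid_counts = {status: 0 for status in VALID_STATUSES}  # Initialize counts for valid statuses
--     invalid_count = 0  # Counter for invalid statuses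
--
--     for line in lines:
--         statuses = process_line(line)
--         for status in statuses:
--             if status in VALID_STATUSES:
--                 valid_counts[status] += 1
--             elif status:  # Count invalid statuses (ignore empty ones)
--                 invalid_count += 1
--
--     return valid_counts, invalid_count
-- ===== SOURCE B (Python) =====
-- VALID_STATUSES = ["OK", "FAULTY", "MAINTENANCE", "INACTIVE"]
--
-- def count_statuses(lines):
--     # Sort-then-scan: sort all cleaned tokens so equal tokens are adjacent,
--     # then walk the runs of equal tokens, attributing each whole run at once.
--     tokens = sorted(t.strip().upper() for line in lines for t in line.split(","))
--     valid_counts = dict.fromkeys(VALID_STATUSES, 0)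
--     invalid_count = 0
--     i, n = 0, len(tokens)
--     while i < n:
--         j = i
--         while j < n and tokens[j] == tokens[i]:
--             j += 1
--         t = tokens[i]
--         if t in valid_counts:
--             valid_counts[t] += j - i
--         elif t:
--             invalid_count += j - i
--         i = j
--     return valid_counts, invalid_count
-- ===== Notes on version B (the rewrite author's own statement) =====
-- stated objective: alternative
-- what changed: Replaces A's streaming per-token counter loop with a sort-then-scan algorithm: all cleaned tokens are sorted so equal tokens become adjacent, and a run-length scan over the sorted list attributes each maximal run of equal tokens to its bucket in one step.
import Mathlib
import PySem

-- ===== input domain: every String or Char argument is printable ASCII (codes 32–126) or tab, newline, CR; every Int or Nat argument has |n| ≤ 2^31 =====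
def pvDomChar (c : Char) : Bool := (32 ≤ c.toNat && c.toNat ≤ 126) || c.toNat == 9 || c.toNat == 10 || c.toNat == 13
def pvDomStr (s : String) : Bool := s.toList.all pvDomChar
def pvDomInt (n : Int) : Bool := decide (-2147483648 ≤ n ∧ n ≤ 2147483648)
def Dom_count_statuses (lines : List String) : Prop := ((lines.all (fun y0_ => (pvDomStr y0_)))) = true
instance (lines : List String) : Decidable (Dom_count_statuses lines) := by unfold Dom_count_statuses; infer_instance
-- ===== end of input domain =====

-- ===== PORT A =====
-- B replaces A's streaming per-token counter loop with sort-then-scan: all cleaned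
-- tokens are sorted and a run-length scan attributes each run of equal tokens at once (alternative).
def pvVALID : List String := ["OK", "FAULTY", "MAINTENANCE", "INACTIVE"]

-- line.split(",") : the separator "," is never empty, so Python never raises here
def pySplitComma (line : String) : List String := (PySem.Str.split? line ",").getD []

def process_line (line : String) : List String :=
  (pySplitComma line).map (fun status => PySem.Str.upper (PySem.Str.strip status))

-- one step of A's inner loop over a cleaned status token
def pvStepA (st : PySem.Dict String Int × Int) (status : String) : PySem.Dict String Int × Int :=
  if pvVALID.contains status then (st.1.insert status (st.1.getD status 0 + 1), st.2)
  else if status == "" then st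
  else (st.1, st.2 + 1)

def count_statuses (lines : List String) : (List (String × Int)) × Int :=
  let init : PySem.Dict String Int := pvVALID.foldl (fun d s => d.insert s 0) PySem.Dict.empty
  let fin := lines.foldl (fun st line => (process_line line).foldl pvStepA st) (init, 0)
  (fin.1.items, fin.2)

-- ===== PORT B =====
-- B's while loop over the sorted token list: peel one maximal run of equal tokens per step
def pvRunsLoop (valid : PySem.Dict String Int) (inv : Int) : List String → PySem.Dict String Int × Int
  | [] => (valid, inv)
  | t :: rest =>
    -- inner while: j advances past the run of tokens equal to tokens[i]
    let run := rest.takeWhile (· == t)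
    let rest' := rest.dropWhile (· == t)
    let n : Int := (run.length : Int) + 1          -- j - i
    if valid.contains t then pvRunsLoop (valid.insert t (valid.getD t 0 + n)) inv rest'
    else if t ≠ "" then pvRunsLoop valid (inv + n) rest'
    else pvRunsLoop valid inv rest'
  termination_by l => l.length
  decreasing_by
    all_goals
      simp only [List.length_cons]
      exact Nat.lt_succ_of_le (List.length_dropWhile_le _ rest)

def count_statuses_alt (lines : List String) : (List (String × Int)) × Int :=
  let tokens := PySem.List.sorted
    (lines.flatMap (fun line =>
      ((PySem.Str.split? line ",").getD []).map (fun t => PySem.Str.upper (PySem.Str.strip t))))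
    (fun x => x) false
  let init : PySem.Dict String Int := pvVALID.foldl (fun d s => d.insert s 0) PySem.Dict.empty
  let fin := pvRunsLoop init 0 tokens
  (fin.1.items, fin.2)

-- ===== PRECONDITION & SPEC =====
def Spec_count_statuses (lines : List String) (out : (List (String × Int)) × Int) : Prop := out = count_statuses_alt lines
instance (lines : List String) (out : (List (String × Int)) × Int) : Decidable (Spec_count_statuses lines out) := by unfold Spec_count_statuses; infer_instance

-- ===== CLAIM (what is proved, stated in full; the proofs are below) =====
def Claim_equal_count_statuses : Prop := ∀ (lines : List String), Dom_count_statuses lines → Spec_count_statuses lines (count_statuses lines)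

-- ===== LEMMAS AND PROOFS =====

-- A's nested loop over lines is the single loop over the flattened token list
theorem pv_foldl_flatMap {α β σ : Type} (l : List α) (f : α → List β) (g : σ → β → σ) (i : σ) :
    (l.flatMap f).foldl g i = l.foldl (fun st x => (f x).foldl g st) i := by
  induction l generalizing i with
  | nil => rfl
  | cons a l ih => simp [List.flatMap_cons, List.foldl_append, ih]

def pvInvalidP (t : String) : Bool := !(t == "") && !(pvVALID.contains t)

-- invariant of A's token loop: the dict stays keyed by pvVALID in order, counts accumulate
theorem pvStepA_loop (ts : List String) (f : String → Int) (i : Int) :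
    ts.foldl pvStepA (PySem.Dict.mk (pvVALID.map (fun s => (s, f s))), i) =
      (PySem.Dict.mk (pvVALID.map (fun s => (s, f s + (ts.count s : Int)))), i + (ts.countP pvInvalidP : Int)) := by
  induction ts generalizing f i with
  | nil => simp
  | cons t ts ih =>
    rw [List.foldl_cons]
    by_cases hv : pvVALID.contains t
    · have hmem : t ∈ pvVALID := by simpa using hv
      have hget : (PySem.Dict.mk (pvVALID.map (fun s => (s, f s)))).getD t 0 = f t := by
        apply PySem.Dict.getD_of_mem_items
        · exact List.mem_map_of_mem hmem
        · show (PySem.Dict.mk (pvVALID.map (fun s => (s, f s)))).keys.Nodup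
          simp only [PySem.Dict.keys, List.map_map]
          show (pvVALID.map (fun s => ((s, f s) : String × Int).1)).Nodup
          simp [pvVALID]
      have hcont : (PySem.Dict.mk (pvVALID.map (fun s => (s, f s)))).contains t = true := by
        rw [PySem.Dict.contains_iff_mem_keys]
        simp only [PySem.Dict.keys, List.map_map]
        exact List.mem_map_of_mem hmem
      have hins : (PySem.Dict.mk (pvVALID.map (fun s => (s, f s)))).insert t (f t + 1) =
          PySem.Dict.mk (pvVALID.map (fun s => (s, if s = t then f s + 1 else f s))) := by
        apply PySem.Dict.ext
        rw [PySem.Dict.items_insert_of_contains _ _ hcont]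
        rw [List.map_map]
        show List.map _ pvVALID = List.map (fun s => (s, if s = t then f s + 1 else f s)) pvVALID
        apply List.map_congr_left
        intro s _
        by_cases hst : s = t
        · subst hst; simp
        · simp [hst]
      have hnp : pvInvalidP t = false := by
        simp only [pvInvalidP, hv, Bool.not_true, Bool.and_false]
      simp only [pvStepA, hv, if_pos, hget, hins]
      rw [ih]
      congr 1
      · congr 1
        apply List.map_congr_left
        intro s _
        by_cases hst : s = t
        · subst hst; rw [List.count_cons]; simp; ring
        · rw [List.count_cons]; simp [Ne.symm hst, hst]
      · rw [List.countP_cons, hnp]; simp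
    · have hnem : t ∉ pvVALID := by simpa using hv
      have hvf : pvVALID.contains t = false := by simpa using hv
      by_cases he : t = ""
      · subst he
        have hnp : pvInvalidP "" = false := by simp [pvInvalidP]
        have hstep : pvStepA (PySem.Dict.mk (pvVALID.map (fun s => (s, f s))), i) "" =
            (PySem.Dict.mk (pvVALID.map (fun s => (s, f s))), i) := by
          unfold pvStepA; rw [hvf]; simp
        rw [hstep, ih]
        congr 1
      · have hef : (t == "") = false := by simpa using he
        have hp : pvInvalidP t = true := by
          unfold pvInvalidP; rw [hvf, hef]; simp
        have hstep : pvStepA (PySem.Dict.mk (pvVALID.map (fun s => (s, f s))), i) t =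
            (PySem.Dict.mk (pvVALID.map (fun s => (s, f s))), i + 1) := by
          unfold pvStepA; rw [hvf, hef]; simp
        rw [hstep, ih]
        congr 1
        · congr 1
          apply List.map_congr_left
          intro s hs
          have hne : t ≠ s := fun h => hnem (h ▸ hs)
          rw [List.count_cons]; simp [hne]
        · rw [List.countP_cons, hp]; simp; ring

-- B's run-length scan has the same closed form as A's token loop (for any token order)
theorem pvRunsLoop_closed (ts : List String) (f : String → Int) (i : Int) :
    pvRunsLoop (PySem.Dict.mk (pvVALID.map (fun s => (s, f s)))) i ts =
      (PySem.Dict.mk (pvVALID.map (fun s => (s, f s + (ts.count s : Int)))), i + (ts.countP pvInvalidP : Int)) := by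
  induction hn : ts.length using Nat.strong_induction_on generalizing ts f i with
  | _ n ih =>
    cases ts with
    | nil => simp [pvRunsLoop]
    | cons t rest =>
      have hsplit : rest = rest.takeWhile (· == t) ++ rest.dropWhile (· == t) :=
        (List.takeWhile_append_dropWhile).symm
      have hrunall : ∀ x ∈ rest.takeWhile (· == t), x = t := by
        intro x hx
        have := List.mem_takeWhile_imp hx
        simpa using this
      have hlen : (rest.dropWhile (· == t)).length < n := by
        subst hn
        simpa using Nat.lt_succ_of_le (List.length_dropWhile_le (· == t) rest)
      have hcount : ∀ s : String, (t :: rest).count s =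
          (if s = t then (rest.takeWhile (· == t)).length + 1 else 0) + (rest.dropWhile (· == t)).count s := by
        intro s
        conv_lhs => rw [hsplit]
        rw [← List.cons_append, List.count_append]
        congr 1
        by_cases hst : s = t
        · subst hst
          rw [if_pos rfl, List.count_cons,
            List.count_eq_length.mpr (by intro x hx; exact (hrunall x hx).symm)]
          simp
        · rw [if_neg hst, List.count_eq_zero]
          intro hmem
          rcases List.mem_cons.mp hmem with h | h
          · exact hst h
          · exact hst (hrunall s h)
      have hcountP : (t :: rest).countP pvInvalidP =
          (if pvInvalidP t then (rest.takeWhile (· == t)).length + 1 else 0) + (rest.dropWhile (· == t)).countP pvInvalidP := by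
        conv_lhs => rw [hsplit]
        rw [← List.cons_append, List.countP_append]
        congr 1
        by_cases hp : pvInvalidP t
        · rw [if_pos hp, List.countP_cons, if_pos hp]
          rw [List.countP_eq_length.mpr (by intro x hx; rw [hrunall x hx]; exact hp)]
        · rw [if_neg hp, List.countP_cons, if_neg hp, List.countP_eq_zero.mpr]
          intro x hx
          rw [hrunall x hx]; simpa using hp
      by_cases hv : pvVALID.contains t
      · have hmem : t ∈ pvVALID := by simpa using hv
        have hget : (PySem.Dict.mk (pvVALID.map (fun s => (s, f s)))).getD t 0 = f t := by
          apply PySem.Dict.getD_of_mem_items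
          · exact List.mem_map_of_mem hmem
          · show (PySem.Dict.mk (pvVALID.map (fun s => (s, f s)))).keys.Nodup
            simp only [PySem.Dict.keys, List.map_map]
            show (pvVALID.map (fun s => ((s, f s) : String × Int).1)).Nodup
            simp [pvVALID]
        have hcont : (PySem.Dict.mk (pvVALID.map (fun s => (s, f s)))).contains t = true := by
          rw [PySem.Dict.contains_iff_mem_keys]
          simp only [PySem.Dict.keys, List.map_map]
          exact List.mem_map_of_mem hmem
        have hins : (PySem.Dict.mk (pvVALID.map (fun s => (s, f s)))).insert t
              (f t + (((rest.takeWhile (· == t)).length : Int) + 1)) =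
            PySem.Dict.mk (pvVALID.map (fun s =>
              (s, (fun u => if u = t then f u + (((rest.takeWhile (· == t)).length : Int) + 1) else f u) s))) := by
          apply PySem.Dict.ext
          rw [PySem.Dict.items_insert_of_contains _ _ hcont]
          rw [List.map_map]
          show List.map _ pvVALID = List.map (fun s =>
            (s, (fun u => if u = t then f u + (((rest.takeWhile (· == t)).length : Int) + 1) else f u) s)) pvVALID
          apply List.map_congr_left
          intro s _
          by_cases hst : s = t
          · subst hst; simp
          · simp [hst]
        have hnp : pvInvalidP t = false := by
          simp only [pvInvalidP, hv, Bool.not_true, Bool.and_false]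
        rw [pvRunsLoop]
        simp only [hcont, if_pos]
        rw [hget, hins, ih _ hlen _ _ _ rfl]
        congr 1
        · congr 1
          apply List.map_congr_left
          intro s _
          rw [hcount s]
          by_cases hst : s = t
          · subst hst; rw [if_pos rfl, if_pos rfl]; push_cast; ring
          · rw [if_neg hst, if_neg hst]; push_cast; ring
        · rw [hcountP, hnp]; simp
      · have hnem : t ∉ pvVALID := by simpa using hv
        have hvf : (PySem.Dict.mk (pvVALID.map (fun s => (s, f s)))).contains t = false := by
          rw [Bool.eq_false_iff]
          intro hc
          rw [PySem.Dict.contains_iff_mem_keys] at hc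
          simp only [PySem.Dict.keys, List.map_map] at hc
          rcases List.mem_map.mp hc with ⟨s, hs, hst⟩
          exact hnem (by simpa [← hst] using hs)
        have hcounts : ∀ s ∈ pvVALID, (t :: rest).count s = (rest.dropWhile (· == t)).count s := by
          intro s hs
          rw [hcount s, if_neg (by rintro rfl; exact hnem hs)]
          simp
        by_cases he : t = ""
        · subst he
          have hnp : pvInvalidP "" = false := by simp [pvInvalidP]
          rw [pvRunsLoop]
          simp only [hvf, Bool.false_eq_true, if_false, ne_eq, not_true_eq_false]
          rw [ih _ hlen _ _ _ rfl]
          congr 1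
          · congr 1
            apply List.map_congr_left
            intro s hs
            rw [hcounts s hs]
          · rw [hcountP, hnp]; simp
        · have hp : pvInvalidP t = true := by
            simp only [pvInvalidP, hv, Bool.not_false, Bool.and_true, Bool.not_eq_true',
              beq_eq_false_iff_ne, ne_eq]
            exact he
          rw [pvRunsLoop]
          simp only [hvf, Bool.false_eq_true, if_false, ne_eq, he, not_false_eq_true, if_true]
          rw [ih _ hlen _ _ _ rfl]
          congr 1
          · congr 1
            apply List.map_congr_left
            intro s hs
            rw [hcounts s hs]
          · rw [hcountP, hp, if_pos rfl]; push_cast; omega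

-- the common initial dict is the zero table over pvVALID
theorem pvInit_eq :
    pvVALID.foldl (fun d s => d.insert s (0 : Int)) PySem.Dict.empty =
      PySem.Dict.mk (pvVALID.map (fun s => (s, (0 : Int)))) := by
  decide

-- ===== VERDICT (by name: the statement is the Claim_ definition above) =====
theorem count_statuses_spec : Claim_equal_count_statuses := by
  intro lines _
  show count_statuses lines = count_statuses_alt lines
  unfold count_statuses count_statuses_alt
  dsimp only
  rw [pvInit_eq, ← pv_foldl_flatMap lines process_line pvStepA]
  set toks := lines.flatMap process_line with htoks
  have hflat : lines.flatMap (fun line =>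
      ((PySem.Str.split? line ",").getD []).map (fun t => PySem.Str.upper (PySem.Str.strip t))) = toks := rfl
  rw [hflat]
  rw [pvStepA_loop toks (fun _ => (0 : Int)) 0]
  rw [pvRunsLoop_closed (PySem.List.sorted toks (fun x => x) false) (fun _ => (0 : Int)) 0]
  have hperm : (PySem.List.sorted toks (fun x => x) false).Perm toks :=
    PySem.List.sorted_perm toks (fun x => x) false
  dsimp only
  congr 1
  · apply List.map_congr_left
    intro s _
    rw [hperm.count_eq]
  · rw [hperm.countP_eq]
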